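-- pv_equiv track=rewrite | github.com/JackErhardt/PyTorch-YOLOv3-kitti | stat.py | det_imbalance_count
-- ===== SOURCE A (Python) =====
-- def det_imbalance_count(
--     dets_l,                 # Array of array of detections in left images
--     dets_r,                 # Array of array of detections in right images
-- ):
--     ylyr = len([None for det_l, det_r in zip(dets_l, dets_r) if det_l != [] and det_r != []])
--     ylnr = len([None for det_l, det_r in zip(dets_l, dets_r) if det_l != [] and det_r == []])
--     nlyr = len([None for det_l, det_r in zip(dets_l, dets_r) if det_l == [] and det_r != []])
--     nlnr = len([None for det_l, det_r in zip(dets_l, dets_r) if det_l == [] and det_r == []])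
--
--     return ylyr, ylnr, nlyr, nlnr
-- ===== SOURCE B (Python) =====
-- def det_imbalance_count(
--     dets_l,                 # Array of array of detections in left images
--     dets_r,                 # Array of array of detections in right images
-- ):
--     # Single pass with four counters instead of four repeated zip scans.
--     ylyr = ylnr = nlyr = nlnr = 0
--     for det_l, det_r in zip(dets_l, dets_r):
--         if det_l != []:
--             if det_r != []:
--                 ylyr += 1
--             else:
--                 ylnr += 1
--         else:
--             if det_r != []:
--                 nlyr += 1
--             else:
--                 nlnr += 1
--     return ylyr, ylnr, nlyr, nlnr
-- ===== Notes on version B (the rewrite author's own statement) =====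
-- stated objective: simpler
-- what changed: Replaces four separate filtering scans over zip(dets_l, dets_r) with a single pass maintaining four counters.
import Mathlib
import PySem

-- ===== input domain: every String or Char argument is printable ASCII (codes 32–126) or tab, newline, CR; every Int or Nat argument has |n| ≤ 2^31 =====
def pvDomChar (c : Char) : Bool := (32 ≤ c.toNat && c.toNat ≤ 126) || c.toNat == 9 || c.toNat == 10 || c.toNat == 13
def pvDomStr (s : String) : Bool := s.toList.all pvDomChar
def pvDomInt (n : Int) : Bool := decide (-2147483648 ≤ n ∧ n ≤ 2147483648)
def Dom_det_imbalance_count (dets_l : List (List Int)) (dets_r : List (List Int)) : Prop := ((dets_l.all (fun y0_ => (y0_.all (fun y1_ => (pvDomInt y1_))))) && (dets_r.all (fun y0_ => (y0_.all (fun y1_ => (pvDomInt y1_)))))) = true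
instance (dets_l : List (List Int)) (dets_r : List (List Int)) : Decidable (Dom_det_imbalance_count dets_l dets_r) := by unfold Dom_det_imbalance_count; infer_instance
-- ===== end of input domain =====

-- B replaces A's four filtering scans over the zipped pairs with one pass over four counters (simpler).

-- ===== PORT A =====
-- A builds four filtered lists over zip(dets_l, dets_r) and returns their lengths.
def det_imbalance_count (dets_l : List (List Int)) (dets_r : List (List Int)) : Int × Int × Int × Int :=
  let z := dets_l.zip dets_r
  let ylyr : Int := (z.filter (fun p => p.1 ≠ [] && p.2 ≠ [])).length
  let ylnr : Int := (z.filter (fun p => p.1 ≠ [] && p.2 == [])).length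
  let nlyr : Int := (z.filter (fun p => p.1 == [] && p.2 ≠ [])).length
  let nlnr : Int := (z.filter (fun p => p.1 == [] && p.2 == [])).length
  (ylyr, ylnr, nlyr, nlnr)

-- ===== PORT B =====
-- B: a single fold over the zipped pairs, incrementing one of four counters per pair.
def pvStep (acc : Int × Int × Int × Int) (p : List Int × List Int) : Int × Int × Int × Int :=
  let (ylyr, ylnr, nlyr, nlnr) := acc
  if p.1 ≠ [] then
    if p.2 ≠ [] then (ylyr + 1, ylnr, nlyr, nlnr) else (ylyr, ylnr + 1, nlyr, nlnr)
  else
    if p.2 ≠ [] then (ylyr, ylnr, nlyr + 1, nlnr) else (ylyr, ylnr, nlyr, nlnr + 1)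

def det_imbalance_count_alt (dets_l : List (List Int)) (dets_r : List (List Int)) : Int × Int × Int × Int :=
  (dets_l.zip dets_r).foldl pvStep (0, 0, 0, 0)

-- ===== PRECONDITION & SPEC =====
def Spec_det_imbalance_count (dets_l : List (List Int)) (dets_r : List (List Int)) (out : Int × Int × Int × Int) : Prop := out = det_imbalance_count_alt dets_l dets_r
instance (dets_l : List (List Int)) (dets_r : List (List Int)) (out : Int × Int × Int × Int) : Decidable (Spec_det_imbalance_count dets_l dets_r out) := by unfold Spec_det_imbalance_count; infer_instance

-- ===== CLAIM (what is proved, stated in full; the proofs are below) =====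
def Claim_equal_det_imbalance_count : Prop := ∀ (dets_l : List (List Int)) (dets_r : List (List Int)), Dom_det_imbalance_count dets_l dets_r → Spec_det_imbalance_count dets_l dets_r (det_imbalance_count dets_l dets_r)

-- ===== LEMMAS AND PROOFS =====
theorem pvFold_counts (z : List (List Int × List Int)) (a b c d : Int) :
    z.foldl pvStep (a, b, c, d) =
      (a + ((z.filter (fun p => p.1 ≠ [] && p.2 ≠ [])).length : Int),
       b + ((z.filter (fun p => p.1 ≠ [] && p.2 == [])).length : Int),
       c + ((z.filter (fun p => p.1 == [] && p.2 ≠ [])).length : Int),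
       d + ((z.filter (fun p => p.1 == [] && p.2 == [])).length : Int)) := by
  induction z generalizing a b c d with
  | nil => simp
  | cons p t ih =>
    by_cases h1 : p.1 = [] <;> by_cases h2 : p.2 = [] <;>
      simp [pvStep, h1, h2, ih] <;> ring

-- ===== VERDICT (by name: the statement is the Claim_ definition above) =====
theorem det_imbalance_count_spec : Claim_equal_det_imbalance_count := by
  intro dets_l dets_r _
  unfold Spec_det_imbalance_count det_imbalance_count det_imbalance_count_alt
  rw [pvFold_counts]
  simp
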